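-- pv_equiv track=rewrite | github.com/collodi/coolmoves | coolmoves.py | get_snippets
-- ===== SOURCE A (Python) =====
-- def get_snippets(lns):
-- 	snippets = []
-- 	seg = []
-- 	for ln in lns:
-- 		if ln.startswith('--'):
-- 			snippets.append(seg)
-- 			seg = []
-- 		else:
-- 			seg.append(ln)
--
-- 	snippets.append(seg)
-- 	return snippets
-- ===== SOURCE B (Python) =====
-- def get_snippets(lns):
-- 	cuts = [i for i, ln in enumerate(lns) if ln.startswith('--')]
-- 	res = []
-- 	prev = 0
-- 	for c in cuts:
-- 		res.append(lns[prev:c])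
-- 		prev = c + 1
-- 	res.append(lns[prev:])
-- 	return res
-- ===== Notes on version B (the rewrite author's own statement) =====
-- stated objective: alternative
-- what changed: B first builds an index table of delimiter positions, then slices the list between consecutive boundaries, instead of accumulating the current segment line by line.
import Mathlib
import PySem

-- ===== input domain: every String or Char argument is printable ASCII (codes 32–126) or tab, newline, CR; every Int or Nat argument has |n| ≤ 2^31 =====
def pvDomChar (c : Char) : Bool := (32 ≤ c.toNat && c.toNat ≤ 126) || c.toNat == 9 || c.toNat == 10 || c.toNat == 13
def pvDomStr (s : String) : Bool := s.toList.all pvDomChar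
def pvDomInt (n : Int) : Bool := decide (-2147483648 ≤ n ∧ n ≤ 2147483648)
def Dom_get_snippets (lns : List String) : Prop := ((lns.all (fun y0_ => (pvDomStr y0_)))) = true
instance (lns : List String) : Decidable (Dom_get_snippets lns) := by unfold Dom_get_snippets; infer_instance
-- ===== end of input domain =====

-- B replaces A's line-by-line segment accumulator by an index table of delimiter
-- positions followed by slicing between consecutive boundaries (objective: alternative).

-- ===== PORT A =====
def get_snippets (lns : List String) : List (List String) :=
  let st := lns.foldl
    (fun (st : List (List String) × List String) ln =>
      if PySem.Str.startswith ln "--" then (st.1 ++ [st.2], [])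
      else (st.1, st.2 ++ [ln]))
    ([], [])
  st.1 ++ [st.2]

-- ===== PORT B =====
def get_snippets_alt (lns : List String) : List (List String) :=
  let cuts := ((PySem.List.enumerate lns 0).filter
      (fun p => PySem.Str.startswith p.2 "--")).map (·.1)
  let st := cuts.foldl
    (fun (st : List (List String) × Int) c =>
      (st.1 ++ [PySem.List.slice lns (some st.2) (some c)], c + 1))
    ([], 0)
  st.1 ++ [PySem.List.slice lns (some st.2) none]

-- ===== PRECONDITION & SPEC =====
def Spec_get_snippets (lns : List String) (out : List (List String)) : Prop := out = get_snippets_alt lns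
instance (lns : List String) (out : List (List String)) : Decidable (Spec_get_snippets lns out) := by unfold Spec_get_snippets; infer_instance

-- ===== CLAIM (what is proved, stated in full; the proofs are below) =====
def Claim_equal_get_snippets : Prop := ∀ (lns : List String), Dom_get_snippets lns → Spec_get_snippets lns (get_snippets lns)

-- ===== LEMMAS AND PROOFS =====

/-- Reference splitter: segments of `lns` between lines starting with "--". -/
def splitRec : List String → List (List String)
  | [] => [[]]
  | l :: ls =>
    if PySem.Str.startswith l "--" then [] :: splitRec ls
    else
      match splitRec ls with
      | [] => [[l]]   -- unreachable: splitRec is never []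
      | h :: t => (l :: h) :: t

/-- Prepend `seg` onto the first segment. -/
def consHead (seg : List String) : List (List String) → List (List String)
  | [] => [seg]
  | h :: t => (seg ++ h) :: t

theorem splitRec_ne_nil (ls : List String) : splitRec ls ≠ [] := by
  cases ls with
  | nil => simp [splitRec]
  | cons l ls =>
    simp only [splitRec]
    split
    · simp
    · cases splitRec ls <;> simp

theorem consHead_nil_of_ne_nil (xs : List (List String)) (h : xs ≠ []) :
    consHead [] xs = xs := by
  cases xs with
  | nil => exact absurd rfl h
  | cons a t => simp [consHead]

/-- Invariant for A's fold. -/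
theorem a_inv (lns : List String) (snips : List (List String)) (seg : List String) :
    (lns.foldl
      (fun (st : List (List String) × List String) ln =>
        if PySem.Str.startswith ln "--" then (st.1 ++ [st.2], [])
        else (st.1, st.2 ++ [ln]))
      (snips, seg)).1
    ++ [(lns.foldl
      (fun (st : List (List String) × List String) ln =>
        if PySem.Str.startswith ln "--" then (st.1 ++ [st.2], [])
        else (st.1, st.2 ++ [ln]))
      (snips, seg)).2]
    = snips ++ consHead seg (splitRec lns) := by
  induction lns generalizing snips seg with
  | nil => simp [splitRec, consHead]
  | cons l ls ih =>
    simp only [List.foldl_cons, splitRec]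
    by_cases hd : PySem.Str.startswith l "--"
    · simp only [hd, if_true]
      rw [ih]
      rw [consHead_nil_of_ne_nil _ (splitRec_ne_nil ls)]
      simp [consHead]
    · simp only [hd, Bool.false_eq_true, if_false]
      rw [ih]
      cases hsp : splitRec ls with
      | nil => exact absurd hsp (splitRec_ne_nil ls)
      | cons h t => simp [consHead]

/-- Invariant for B's fold: processing the cuts of the suffix `lns.drop k`,
starting from segment boundary `s ≤ k`. -/
theorem b_inv (lns : List String) (suf : List String) (res : List (List String))
    (s k : Nat) (hdrop : lns.drop k = suf) (hsk : s ≤ k) :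
    ((((PySem.List.enumerate suf (k : Int)).filter
        (fun p => PySem.Str.startswith p.2 "--")).map (·.1)).foldl
      (fun (st : List (List String) × Int) c =>
        (st.1 ++ [PySem.List.slice lns (some st.2) (some c)], c + 1))
      (res, (s : Int))).1
    ++ [PySem.List.slice lns
      (some ((((PySem.List.enumerate suf (k : Int)).filter
        (fun p => PySem.Str.startswith p.2 "--")).map (·.1)).foldl
      (fun (st : List (List String) × Int) c =>
        (st.1 ++ [PySem.List.slice lns (some st.2) (some c)], c + 1))
      (res, (s : Int))).2) none]
    = res ++ consHead ((lns.drop s).take (k - s)) (splitRec suf) := by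
  induction suf generalizing res s k with
  | nil =>
    have hlen : lns.length ≤ k := by
      by_contra hlt
      push Not at hlt
      have := List.drop_eq_nil_iff.mp hdrop
      omega
    simp only [PySem.List.enumerate_nil, List.filter_nil, List.map_nil, List.foldl_nil,
      splitRec, consHead]
    rw [PySem.List.slice_from_natCast]
    congr 2
    rw [List.take_of_length_le (by simp; omega)]
    simp
  | cons l ls ih =>
    have hk : k < lns.length := by
      by_contra hge
      push Not at hge
      rw [List.drop_eq_nil_iff.mpr hge] at hdrop
      exact List.cons_ne_nil l ls hdrop.symm
    have hls : lns.drop (k + 1) = ls := by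
      rw [← List.drop_drop, hdrop, List.drop_one, List.tail_cons]
    have hget : lns[k]? = some l := by
      have h0 : (lns.drop k)[0]? = some l := by rw [hdrop]; rfl
      rw [List.getElem?_drop] at h0
      simpa using h0
    have hc : ((k : Int) + 1) = ((k + 1 : Nat) : Int) := by push_cast; ring
    rw [PySem.List.enumerate_cons]
    simp only [List.filter_cons]
    by_cases hd : PySem.Str.startswith l "--"
    · simp only [hd, if_true, List.map_cons, List.foldl_cons]
      rw [hc, ih (res ++ [PySem.List.slice lns (some (s : Int)) (some (k : Int))])
        (k + 1) (k + 1) hls (le_refl _)]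
      simp only [splitRec, hd, if_true, Nat.sub_self, List.take_zero, consHead,
        PySem.List.slice_natCast]
      simp
      cases hsp : splitRec ls with
      | nil => exact absurd hsp (splitRec_ne_nil ls)
      | cons h t => rfl
    · simp only [hd, Bool.false_eq_true, if_false]
      rw [hc, ih res s (k + 1) hls (by omega)]
      simp only [splitRec, hd, Bool.false_eq_true, if_false]
      cases hsp : splitRec ls with
      | nil => exact absurd hsp (splitRec_ne_nil ls)
      | cons h t =>
        simp only [consHead]
        have htake : (lns.drop s).take (k + 1 - s) = (lns.drop s).take (k - s) ++ [l] := by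
          have hidx : (lns.drop s)[k - s]? = some l := by
            rw [List.getElem?_drop]
            have hsk' : s + (k - s) = k := by omega
            rw [hsk', hget]
          have : k + 1 - s = (k - s) + 1 := by omega
          rw [this, List.take_add_one, hidx]
          rfl
        rw [htake]
        simp

-- ===== VERDICT (by name: the statement is the Claim_ definition above) =====
theorem get_snippets_spec : Claim_equal_get_snippets := by
  intro lns _
  show get_snippets lns = get_snippets_alt lns
  unfold get_snippets get_snippets_alt
  have hA := a_inv lns [] []
  have hB := b_inv lns lns [] 0 0 (by simp) (le_refl 0)
  simp only [Nat.cast_zero, Nat.sub_self, List.take_zero] at hB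
  simp only at hA ⊢
  rw [hA, hB]
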